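-- pv_equiv track=rewrite | github.com/Samisaac20/maze-solver | backend/app/algorithms/ant_colony/ant_colony_solver.py | _find_start_goal
-- ===== SOURCE A (Python) =====
-- from typing import Dict, List, Sequence, Tuple
--
-- Grid = Sequence[Sequence[int]]
--
-- Cell = Tuple[int, int]
--
-- def _find_start_goal(maze: Grid) -> Tuple[Cell, Cell]:
--   """Find the start (top-left) and goal (bottom-right) open cells."""
--   rows = len(maze)
--   cols = len(maze[0])
--   start = None
--   goal = None
--
--   for r in range(rows):
--     for c in range(cols):
--       if maze[r][c] == 0:
--         start = (r, c)
--         break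
--     if start:
--       break
--
--   for r in range(rows - 1, -1, -1):
--     for c in range(cols - 1, -1, -1):
--       if maze[r][c] == 0:
--         goal = (r, c)
--         break
--     if goal:
--       break
--
--   if start is None or goal is None:
--     raise ValueError("maze must have at least one open cell for start/goal")
--   return start, goal
-- ===== SOURCE B (Python) =====
-- def _find_start_goal(maze):
--   """Find the start (top-left) and goal (bottom-right) open cells."""
--   rows = len(maze)
--   cols = len(maze[0])
--   start = None
--   goal = None
--   for r in range(rows):
--     for c in range(cols):
--       if maze[r][c] == 0:
--         if start is None:
--           start = (r, c)
--         goal = (r, c)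
--   if start is None:
--     raise ValueError("maze must have at least one open cell for start/goal")
--   return start, goal
-- ===== Notes on version B (the rewrite author's own statement) =====
-- stated objective: simpler
-- what changed: Replaced A's two oppositely-directed break-out scans with one forward pass that records the first open cell once and overwrites the last open cell on every hit.
-- outside the precondition, e.g. on _find_start_goal([[0], [], [0]]): A returns ((0, 0), (2, 0)), B raises IndexError
import Mathlib
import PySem

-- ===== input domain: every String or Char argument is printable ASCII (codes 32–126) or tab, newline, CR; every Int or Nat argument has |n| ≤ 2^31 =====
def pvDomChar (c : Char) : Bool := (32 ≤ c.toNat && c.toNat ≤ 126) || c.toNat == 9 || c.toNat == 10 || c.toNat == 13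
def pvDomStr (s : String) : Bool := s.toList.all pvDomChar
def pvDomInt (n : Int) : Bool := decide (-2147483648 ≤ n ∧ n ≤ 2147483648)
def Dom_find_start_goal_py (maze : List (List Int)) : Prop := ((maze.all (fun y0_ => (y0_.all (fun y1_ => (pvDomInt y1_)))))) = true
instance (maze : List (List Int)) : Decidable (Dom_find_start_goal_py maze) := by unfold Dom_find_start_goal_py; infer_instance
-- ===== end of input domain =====

-- B replaces A's two oppositely-directed break-out scans by ONE forward pass that keeps
-- the first open cell and overwrites the last open cell (objective: simpler, same cost).


-- ===== PORT A =====
-- inner 'for c in cs: if maze[r][c] == 0: start = (r, c); break'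
def aScanRow (row : List Int) (r : Nat) : List Nat → Option (Int × Int)
  | [] => none
  | c :: cs =>
    if PySem.List.pyGet? row (c : Int) = some 0 then some ((r : Int), (c : Int))
    else aScanRow row r cs
-- outer 'for r in rs: <inner over cs>; if found: break'; a none from pyGet? is an
-- IndexError in Python — those inputs are excluded by Pre_find_start_goal_py
def aScan (maze : List (List Int)) (cs : List Nat) : List Nat → Option (Int × Int)
  | [] => none
  | r :: rs =>
    match PySem.List.pyGet? maze (r : Int) with
    | none => none   -- IndexError (ragged/short maze), excluded by Pre_
    | some row =>
      match aScanRow row r cs with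
      | some p => some p
      | none => aScan maze cs rs
def find_start_goal_py (maze : List (List Int)) : (Int × Int) × (Int × Int) :=
  let rows := maze.length
  let cols := ((PySem.List.pyGet? maze 0).getD []).length  -- len(maze[0]); IndexError on [], excluded by Pre_
  -- for r in range(rows): for c in range(cols): …  with breaks
  let start := aScan maze (List.range cols) (List.range rows)
  -- for r in range(rows-1,-1,-1): for c in range(cols-1,-1,-1): …  with breaks
  let goal := aScan maze ((List.range cols).reverse) ((List.range rows).reverse)
  match start, goal with
  | some s, some g => (s, g)
  | _, _ => ((0, 0), (0, 0))   -- ValueError (no open cell), excluded by Pre_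

-- ===== PORT B =====
-- body of B's single loop: if maze[r][c] == 0: (set start only if still unset; goal = (r, c))
def bStep (maze : List (List Int)) (st : Option (Int × Int) × Option (Int × Int))
    (r c : Nat) : Option (Int × Int) × Option (Int × Int) :=
  if (PySem.List.pyGet? maze (r : Int)).bind (fun row => PySem.List.pyGet? row (c : Int))
      = some 0 then
    -- a none from pyGet? is an IndexError in Python (excluded by Pre_); it is not 'some 0'
    ((if st.1.isNone then some ((r : Int), (c : Int)) else st.1), some ((r : Int), (c : Int)))
  else st
def find_start_goal_py_alt (maze : List (List Int)) : (Int × Int) × (Int × Int) :=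
  let rows := maze.length
  let cols := ((PySem.List.pyGet? maze 0).getD []).length  -- len(maze[0]); IndexError on [], excluded by Pre_
  let st := (List.range rows).foldl
    (fun st r => (List.range cols).foldl (fun st c => bStep maze st r c) st)
    ((none, none) : Option (Int × Int) × Option (Int × Int))
  if st.1.isNone then ((0, 0), (0, 0))   -- ValueError ('start is None'), excluded by Pre_
  else (st.1.getD (0, 0), st.2.getD (0, 0))  -- goal is always set when start is

-- ===== PRECONDITION & SPEC =====
-- Pre_ excludes grids on which Python raises: the empty grid and grids with no open cell
-- among the first len(maze[0]) columns (ValueError / IndexError in both programs), and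
-- ragged grids with a row shorter than len(maze[0]), where B's full single pass raises
-- IndexError while A's early breaks can skip the short row and still return.
def Pre_find_start_goal_py (maze : List (List Int)) : Prop :=
  maze ≠ [] ∧
  (∀ row ∈ maze, (maze.headD []).length ≤ row.length) ∧
  ∃ r < maze.length, ∃ c < (maze.headD []).length, (maze.getD r []).getD c 1 = 0
instance (maze : List (List Int)) : Decidable (Pre_find_start_goal_py maze) := by
  unfold Pre_find_start_goal_py; infer_instance
def pvWitness_find_start_goal_py : List (List Int) := [[1, 0], [0, 1]]
def Spec_find_start_goal_py (maze : List (List Int)) (out : (Int × Int) × (Int × Int)) : Prop := out = find_start_goal_py_alt maze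
instance (maze : List (List Int)) (out : (Int × Int) × (Int × Int)) : Decidable (Spec_find_start_goal_py maze out) := by unfold Spec_find_start_goal_py; infer_instance

-- ===== CLAIM (what is proved, stated in full; the proofs are below) =====
def Claim_equal_find_start_goal_py : Prop := ∀ (maze : List (List Int)), Dom_find_start_goal_py maze → Pre_find_start_goal_py maze → Spec_find_start_goal_py maze (find_start_goal_py maze)

-- ===== LEMMAS AND PROOFS =====

-- the open cells of one row, in the column order of cs
def opensRow (row : List Int) (r : Nat) (cs : List Nat) : List (Int × Int) :=
  cs.filterMap (fun (c : Nat) =>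
    if PySem.List.pyGet? row (c : Int) = some 0 then some ((r : Int), (c : Int)) else none)

-- all open cells of the maze, row-major
def opens (maze : List (List Int)) (cols : Nat) (rs : List Nat) : List (Int × Int) :=
  rs.flatMap (fun r => opensRow (maze.getD r []) r (List.range cols))

theorem opensRow_cons_pos (row : List Int) (r c : Nat) (cs : List Nat)
    (h : PySem.List.pyGet? row (c : Int) = some 0) :
    opensRow row r (c :: cs) = ((r : Int), (c : Int)) :: opensRow row r cs := by
  simp only [opensRow, List.filterMap_cons, if_pos h]

theorem opensRow_cons_neg (row : List Int) (r c : Nat) (cs : List Nat)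
    (h : ¬ PySem.List.pyGet? row (c : Int) = some 0) :
    opensRow row r (c :: cs) = opensRow row r cs := by
  simp only [opensRow, List.filterMap_cons, if_neg h]

theorem aScanRow_eq (row : List Int) (r : Nat) (cs : List Nat) :
    aScanRow row r cs = (opensRow row r cs).head? := by
  induction cs with
  | nil => rfl
  | cons c cs ih =>
    by_cases h : PySem.List.pyGet? row (c : Int) = some 0
    · rw [opensRow_cons_pos row r c cs h]
      simp only [aScanRow, if_pos h, List.head?_cons]
    · rw [opensRow_cons_neg row r c cs h]
      simp only [aScanRow, if_neg h]
      exact ih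

theorem aScan_eq (maze : List (List Int)) (cs : List Nat) (rs : List Nat)
    (h : ∀ r ∈ rs, r < maze.length) :
    aScan maze cs rs = (rs.flatMap (fun r => opensRow (maze.getD r []) r cs)).head? := by
  induction rs with
  | nil => rfl
  | cons r rs ih =>
    have hr : r < maze.length := h r (by simp)
    have hrow : PySem.List.pyGet? maze (r : Int) = some (maze.getD r []) := by
      rw [PySem.List.pyGet?_natCast, List.getElem?_eq_getElem hr, List.getD_eq_getElem _ _ hr]
    simp only [aScan, hrow, aScanRow_eq, List.flatMap_cons, List.head?_append]
    cases hh : (opensRow (maze.getD r []) r cs).head? with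
    | some p => rfl
    | none =>
      simp only [Option.none_or]
      exact ih (fun x hx => h x (by simp [hx]))

theorem opensRow_reverse (row : List Int) (r : Nat) (cs : List Nat) :
    opensRow row r cs.reverse = (opensRow row r cs).reverse := by
  simp only [opensRow, List.filterMap_reverse]

-- B's inner fold over range(cols) = fold of the simple step over the open cells of the row
def bStep2 (st : Option (Int × Int) × Option (Int × Int)) (p : Int × Int) :
    Option (Int × Int) × Option (Int × Int) :=
  ((match st.1 with | none => some p | some s => some s), some p)

theorem bFold_row (maze : List (List Int)) (r : Nat) (hr : r < maze.length)
    (cs : List Nat) (st : Option (Int × Int) × Option (Int × Int)) :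
    cs.foldl (fun st c => bStep maze st r c) st
      = (opensRow (maze.getD r []) r cs).foldl bStep2 st := by
  induction cs generalizing st with
  | nil => rfl
  | cons c cs ih =>
    have hrow : PySem.List.pyGet? maze (r : Int) = some (maze.getD r []) := by
      rw [PySem.List.pyGet?_natCast, List.getElem?_eq_getElem hr, List.getD_eq_getElem _ _ hr]
    by_cases h : PySem.List.pyGet? (maze.getD r []) (c : Int) = some 0
    · obtain ⟨s1, s2⟩ := st
      rw [List.foldl_cons, opensRow_cons_pos _ r c cs h, List.foldl_cons,
        show bStep maze (s1, s2) r c = bStep2 (s1, s2) ((r : Int), (c : Int)) by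
          simp only [bStep, hrow, Option.bind_some, h, if_pos, bStep2]
          cases s1 <;> rfl]
      exact ih _
    · rw [List.foldl_cons, opensRow_cons_neg _ r c cs h,
        show bStep maze st r c = st by
          simp only [bStep, hrow, Option.bind_some]
          rw [if_neg h]]
      exact ih st

theorem bFold_all (maze : List (List Int)) (cols : Nat) (rs : List Nat)
    (h : ∀ r ∈ rs, r < maze.length) (st : Option (Int × Int) × Option (Int × Int)) :
    rs.foldl (fun st r => (List.range cols).foldl (fun st c => bStep maze st r c) st) st
      = (opens maze cols rs).foldl bStep2 st := by
  induction rs generalizing st with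
  | nil => rfl
  | cons r rs ih =>
    simp only [List.foldl_cons, opens, List.flatMap_cons, List.foldl_append]
    rw [bFold_row maze r (h r (by simp)) (List.range cols) st]
    exact ih (fun x hx => h x (by simp [hx])) _

theorem bStep2_fold_some (L : List (Int × Int)) (s : Int × Int) (g : Option (Int × Int)) :
    L.foldl bStep2 (some s, g) = (some s, L.getLast?.or g) := by
  induction L generalizing g with
  | nil => rfl
  | cons a L ih =>
    show L.foldl bStep2 (bStep2 (some s, g) a) = _
    rw [show bStep2 (some s, g) a = (some s, some a) from rfl, ih, List.getLast?_cons]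
    cases hL : L.getLast? <;> simp

theorem bStep2_fold (a : Int × Int) (L : List (Int × Int)) :
    (a :: L).foldl bStep2 (none, none) = (some a, ((a :: L).getLast?)) := by
  show L.foldl bStep2 (bStep2 (none, none) a) = _
  rw [show bStep2 (none, none) a = (some a, some a) from rfl, bStep2_fold_some,
    List.getLast?_cons]
  cases hL : L.getLast? <;> simp

-- Pre_ guarantees the open-cell list is nonempty
theorem opens_ne_nil (maze : List (List Int)) (h : Pre_find_start_goal_py maze) :
    opens maze (maze.headD []).length (List.range maze.length) ≠ [] := by
  obtain ⟨-, hrect, r, hr, c, hc, hopen⟩ := h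
  have hrowmem : (maze.getD r []) ∈ maze := by
    rw [List.getD_eq_getElem _ _ hr]; exact List.getElem_mem hr
  have hlen : c < (maze.getD r []).length := lt_of_lt_of_le hc (hrect _ hrowmem)
  rw [List.getD_eq_getElem _ _ hlen] at hopen
  have hget : PySem.List.pyGet? (maze.getD r []) (c : Int) = some 0 := by
    rw [PySem.List.pyGet?_natCast, List.getElem?_eq_getElem hlen, hopen]
  have hmem : ((r : Int), (c : Int))
      ∈ opens maze (maze.headD []).length (List.range maze.length) := by
    unfold opens
    refine List.mem_flatMap.mpr ⟨r, List.mem_range.mpr hr, ?_⟩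
    unfold opensRow
    refine List.mem_filterMap.mpr ⟨c, List.mem_range.mpr hc, ?_⟩
    rw [if_pos hget]
  exact List.ne_nil_of_mem hmem

-- ===== VERDICT (by name: the statement is the Claim_ definition above) =====
theorem find_start_goal_py_spec : Claim_equal_find_start_goal_py := by
  intro maze _ hpre
  unfold Spec_find_start_goal_py
  have hne : maze ≠ [] := hpre.1
  have hcols : ((PySem.List.pyGet? maze 0).getD []).length = (maze.headD []).length := by
    cases maze with
    | nil => exact absurd rfl hne
    | cons x xs => rw [PySem.List.pyGet?_zero_cons]; rfl
  set cols := (maze.headD []).length with hc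
  have hbound : ∀ r ∈ List.range maze.length, r < maze.length := fun r hr => List.mem_range.mp hr
  have hboundR : ∀ r ∈ (List.range maze.length).reverse, r < maze.length := by
    intro r hr; exact List.mem_range.mp (List.mem_reverse.mp hr)
  -- A's two scans compute head? and getLast? of the open-cell list
  have hstart : aScan maze (List.range cols) (List.range maze.length)
      = (opens maze cols (List.range maze.length)).head? := by
    rw [aScan_eq _ _ _ hbound]; rfl
  have hgoal : aScan maze ((List.range cols).reverse) ((List.range maze.length).reverse)
      = (opens maze cols (List.range maze.length)).getLast? := by
    rw [aScan_eq _ _ _ hboundR]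
    simp only [opensRow_reverse]
    rw [show (fun r => (opensRow (maze.getD r []) r (List.range cols)).reverse)
        = (List.reverse ∘ fun r => opensRow (maze.getD r []) r (List.range cols)) from rfl,
      ← List.reverse_flatMap, List.head?_reverse]
    rfl
  -- B's fold computes the same pair
  obtain ⟨a, L, hL⟩ : ∃ a L, opens maze cols (List.range maze.length) = a :: L := by
    cases ho : opens maze cols (List.range maze.length) with
    | nil => exact absurd ho (opens_ne_nil maze hpre)
    | cons a L => exact ⟨a, L, rfl⟩
  have hB : (List.range maze.length).foldl
      (fun st r => (List.range cols).foldl (fun st c => bStep maze st r c) st) (none, none)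
      = (some a, (a :: L).getLast?) := by
    rw [bFold_all maze cols _ hbound, hL, bStep2_fold]
  have hg : (a :: L).getLast? = some (L.getLast?.getD a) := List.getLast?_cons
  show find_start_goal_py maze = find_start_goal_py_alt maze
  unfold find_start_goal_py find_start_goal_py_alt
  simp only [hcols, hstart, hgoal, hB, hL, hg, List.head?_cons]
  rfl
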